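-- pv_equiv track=rewrite | github.com/chinmayjain18/User-Profile-Classification-based-on-Tweets-New | problemset3.py | _getEducationFromString
-- ===== SOURCE A (Python) =====
-- from enum import Enum
--
-- class EDUCATION_CLASS(Enum):
--     high_school = 0
--     some_college = 1
--     graduate = 2
--
-- def _getEducationFromString(user_education):
--     '''
--     Args:
--         input: Input string from user response for education level
--     Returns:
--         EDUCATION_CLASS of user, or None for not sure
--     '''
--     hs_keywords = ['high']
--     sc_keywords = ['bachelor', 'college', 'bs', 'ba']
--     g_keywords = ['doctoral', 'phd', 'ma', 'master', 'graduate', 'mba', 'mlis']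
--     if not user_education:
--         return None
--     else:
--         user_education = user_education.lower()
--         for keyword in hs_keywords:
--             if keyword in user_education:
--                 return EDUCATION_CLASS.high_school.value
--         for keyword in sc_keywords:
--             if keyword in user_education:
--                 return EDUCATION_CLASS.some_college.value
--         for keyword in g_keywords:
--             if keyword in user_education:
--                 return EDUCATION_CLASS.graduate.value
--     return None
-- ===== SOURCE B (Python) =====
-- def _getEducationFromString(user_education):
--     '''
--     Different algorithm: a single left-to-right position scan of the string
--     against one keyword->class table (an Aho-Corasick-style sweep without the
--     automaton), keeping the minimum class value matched anywhere; the numeric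
--     order of the class values encodes the priority of A's three staged loops.
--     '''
--     if not user_education:
--         return None
--     edu = user_education.lower()
--     table = {'high': 0,
--              'bachelor': 1, 'college': 1, 'bs': 1, 'ba': 1,
--              'doctoral': 2, 'phd': 2, 'ma': 2, 'master': 2,
--              'graduate': 2, 'mba': 2, 'mlis': 2}
--     best = None
--     for i in range(len(edu)):
--         for kw, val in table.items():
--             if edu.startswith(kw, i) and (best is None or val < best):
--                 best = val
--     return best
-- ===== Notes on version B (the rewrite author's own statement) =====
-- stated objective: alternative
-- what changed: Replaces A's three staged per-keyword whole-string substring scans (first matching group wins) by a single left-to-right position sweep of the string against one keyword->class table, tracking the minimum matched class value; the numeric order of the class values encodes A's group priority.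
import Mathlib
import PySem

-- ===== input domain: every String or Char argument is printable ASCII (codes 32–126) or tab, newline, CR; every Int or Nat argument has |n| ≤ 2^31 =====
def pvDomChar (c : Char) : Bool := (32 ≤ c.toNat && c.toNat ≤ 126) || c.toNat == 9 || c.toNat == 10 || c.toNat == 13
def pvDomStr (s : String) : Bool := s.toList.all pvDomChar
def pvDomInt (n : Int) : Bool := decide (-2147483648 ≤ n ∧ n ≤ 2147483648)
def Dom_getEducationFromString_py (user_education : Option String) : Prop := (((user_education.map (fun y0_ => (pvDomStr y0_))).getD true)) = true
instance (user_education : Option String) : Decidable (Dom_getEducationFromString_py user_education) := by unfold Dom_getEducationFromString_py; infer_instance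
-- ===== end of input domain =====

-- B replaces A's three staged keyword loops (per-keyword whole-string substring tests,
-- first match wins) by a single left-to-right position scan against one
-- keyword->class table, keeping the minimum matched class value ('alternative').

-- ===== PORT A =====
def getEducationFromString_py (user_education : Option String) : Option Int :=
  match user_education with
  | none => none
  | some s =>
    if s = "" then none
    else
      let edu := PySem.Str.lower s
      if ["high"].any (fun k => PySem.Str.isIn k edu) then some 0
      else if ["bachelor", "college", "bs", "ba"].any (fun k => PySem.Str.isIn k edu) then some 1
      else if ["doctoral", "phd", "ma", "master", "graduate", "mba", "mlis"].any (fun k => PySem.Str.isIn k edu) then some 2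
      else none

-- ===== PORT B =====
-- the keyword -> class-value table (insertion order of Source B's dict)
def pvTable : List (List Char × Int) :=
  [("high".toList, 0),
   ("bachelor".toList, 1), ("college".toList, 1), ("bs".toList, 1), ("ba".toList, 1),
   ("doctoral".toList, 2), ("phd".toList, 2), ("ma".toList, 2), ("master".toList, 2),
   ("graduate".toList, 2), ("mba".toList, 2), ("mlis".toList, 2)]

-- edu.startswith(kw, i) with 0 ≤ i is exactly 'kw is a prefix of edu[i:]' (CPython semantics)
def getEducationFromString_py_alt (user_education : Option String) : Option Int :=
  match user_education with
  | none => none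
  | some s =>
    if s = "" then none
    else
      let edu := (PySem.Str.lower s).toList
      (List.range edu.length).foldl
        (fun best i =>
          pvTable.foldl
            (fun best p =>
              if PySem.Chars.startswith (edu.drop i) p.1
                  && (match best with | none => true | some b => p.2 < b)
              then some p.2 else best)
            best)
        none

-- ===== PRECONDITION & SPEC =====
def Spec_getEducationFromString_py (user_education : Option String) (out : Option Int) : Prop := out = getEducationFromString_py_alt user_education
instance (user_education : Option String) (out : Option Int) : Decidable (Spec_getEducationFromString_py user_education out) := by unfold Spec_getEducationFromString_py; infer_instance

-- ===== CLAIM (what is proved, stated in full; the proofs are below) =====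
def Claim_equal_getEducationFromString_py : Prop := ∀ (user_education : Option String), Dom_getEducationFromString_py user_education → Spec_getEducationFromString_py user_education (getEducationFromString_py user_education)

-- ===== LEMMAS AND PROOFS =====

-- B's literal loop step equals a 'keep the minimum' step.
theorem pvStep_eq (m : Bool) (v : Int) (b : Option Int) :
    (if m && (match b with | none => true | some x => v < x) then some v else b)
    = (if m then some (match b with | none => v | some x => min x v) else b) := by
  cases m <;> cases b <;> simp
  split_ifs <;> simp [min_def] <;> omega

-- the min-fold over any list of (flag, value) pairs is min? of the matched values
theorem pvFold_min {α : Type} (mq : α → Bool) (vq : α → Int) (l : List α) (b : Option Int) :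
    l.foldl (fun b q => if mq q then some (match b with | none => vq q | some x => min x (vq q)) else b) b
    = (b.toList ++ (l.filter mq).map vq).min? := by
  induction l generalizing b with
  | nil => cases b <;> simp
  | cons q l ih =>
    by_cases hm : mq q = true
    · rw [List.foldl_cons, ih]
      cases b with
      | none => simp [hm]
      | some x =>
        simp only [hm, if_pos, List.filter_cons_of_pos hm, List.map_cons, Option.toList_some]
        simp only [List.singleton_append, List.min?_cons']
        simp [List.foldl_cons]
    · rw [List.foldl_cons, ih]
      simp [hm, List.filter_cons_of_neg]

-- keyword kw occurs in cs iff it matches at some scanned position (kw nonempty)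
theorem pvIsIn_iff (kw cs : List Char) (hkw : kw ≠ []) :
    PySem.Chars.isIn kw cs = true ↔ ∃ i ∈ List.range cs.length, kw <+: cs.drop i := by
  rw [← PySem.Chars.exists_prefix_drop_iff_isIn]
  constructor
  · rintro ⟨j, hj⟩
    refine ⟨j, List.mem_range.mpr ?_, hj⟩
    by_contra h
    have : cs.drop j = [] := List.drop_eq_nil_of_le (by omega)
    rw [this] at hj
    exact hkw (List.prefix_nil.mp hj)
  · rintro ⟨i, _, hi⟩; exact ⟨i, hi⟩

-- proof-side helpers: the scanned (position, table-entry) pairs and the matched class values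
def pvPairs (n : Nat) : List (Nat × (List Char × Int)) :=
  (List.range n).flatMap (fun i => pvTable.map (fun p => (i, p)))

def pvML (edu : List Char) : List Int :=
  ((pvPairs edu.length).filter (fun q => PySem.Chars.startswith (edu.drop q.1) q.2.1)).map
    (fun q => q.2.2)

-- B's double fold is min? of the matched class values
theorem pvB_char (edu : List Char) :
    (List.range edu.length).foldl
      (fun best i =>
        pvTable.foldl
          (fun best p =>
            if PySem.Chars.startswith (edu.drop i) p.1
                && (match best with | none => true | some b => p.2 < b)
            then some p.2 else best)
          best)
      none
    = (pvML edu).min? := by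
  have h1 : ∀ (i : Nat) (b : Option Int),
      pvTable.foldl
        (fun best p =>
          if PySem.Chars.startswith (edu.drop i) p.1
              && (match best with | none => true | some b => p.2 < b)
          then some p.2 else best) b
      = (pvTable.map (fun p => (i, p))).foldl
          (fun (b : Option Int) (q : Nat × (List Char × Int)) =>
            if PySem.Chars.startswith (edu.drop q.1) q.2.1
            then some (match b with | none => q.2.2 | some x => min x q.2.2) else b) b := by
    intro i b
    rw [List.foldl_map]
    have hf : (fun (best : Option Int) (p : List Char × Int) =>
          if PySem.Chars.startswith (edu.drop i) p.1
              && (match best with | none => true | some b => p.2 < b)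
          then some p.2 else best)
        = (fun (b : Option Int) (p : List Char × Int) =>
          if PySem.Chars.startswith (edu.drop i) p.1
          then some (match b with | none => p.2 | some x => min x p.2) else b) := by
      funext b p
      exact pvStep_eq _ _ _
    rw [hf]
  simp only [h1]
  rw [← List.foldl_flatMap]
  exact pvFold_min (fun (q : Nat × (List Char × Int)) => PySem.Chars.startswith (edu.drop q.1) q.2.1) (fun (q : Nat × (List Char × Int)) => q.2.2) _ none

-- which class values get matched: exactly those of a keyword occurring in edu
theorem pvMem (edu : List Char) (v : Int) :
    v ∈ pvML edu ↔ ∃ p ∈ pvTable, p.2 = v ∧ PySem.Chars.isIn p.1 edu = true := by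
  have hne : ∀ p ∈ pvTable, p.1 ≠ ([] : List Char) := by decide
  simp only [pvML, pvPairs, List.mem_map, List.mem_filter, List.mem_flatMap, List.mem_range]
  constructor
  · rintro ⟨q, ⟨⟨j, hj, hmem⟩, hsw⟩, rfl⟩
    obtain ⟨p, hp, rfl⟩ := hmem
    refine ⟨p, hp, rfl, ?_⟩
    exact (pvIsIn_iff p.1 edu (hne p hp)).mpr
      ⟨j, List.mem_range.mpr hj, (PySem.Chars.startswith_iff _ _).mp hsw⟩
  · rintro ⟨p, hp, rfl, hin⟩
    obtain ⟨i, hi, hpre⟩ := (pvIsIn_iff p.1 edu (hne p hp)).mp hin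
    exact ⟨(i, p), ⟨⟨i, List.mem_range.mp hi, ⟨p, hp, rfl⟩⟩,
      (PySem.Chars.startswith_iff _ _).mpr hpre⟩, rfl⟩

-- ===== VERDICT (by name: the statement is the Claim_ definition above) =====
theorem getEducationFromString_py_spec : Claim_equal_getEducationFromString_py := by
  intro u _
  unfold Spec_getEducationFromString_py getEducationFromString_py getEducationFromString_py_alt
  cases u with
  | none => rfl
  | some s =>
    by_cases hs : s = ""
    · simp [hs]
    · simp only [hs, if_false]
      rw [pvB_char ((PySem.Str.lower s).toList)]
      set edu := (PySem.Str.lower s).toList with hedu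
      have hA : ∀ k : String, PySem.Str.isIn k (PySem.Str.lower s) = PySem.Chars.isIn k.toList edu := by
        intro k; simp [hedu]
      have h0 : (0 : Int) ∈ pvML edu ↔ PySem.Chars.isIn "high".toList edu = true := by
        rw [pvMem]; simp [pvTable]
      have h1 : (1 : Int) ∈ pvML edu ↔
          (PySem.Chars.isIn "bachelor".toList edu = true ∨ PySem.Chars.isIn "college".toList edu = true ∨
           PySem.Chars.isIn "bs".toList edu = true ∨ PySem.Chars.isIn "ba".toList edu = true) := by
        rw [pvMem]; simp [pvTable]
      have h2 : (2 : Int) ∈ pvML edu ↔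
          (PySem.Chars.isIn "doctoral".toList edu = true ∨ PySem.Chars.isIn "phd".toList edu = true ∨
           PySem.Chars.isIn "ma".toList edu = true ∨ PySem.Chars.isIn "master".toList edu = true ∨
           PySem.Chars.isIn "graduate".toList edu = true ∨ PySem.Chars.isIn "mba".toList edu = true ∨
           PySem.Chars.isIn "mlis".toList edu = true) := by
        rw [pvMem]; simp [pvTable]
      have hrange : ∀ x ∈ pvML edu, x = 0 ∨ x = 1 ∨ x = 2 := by
        intro x hx
        obtain ⟨p, hp, hv, -⟩ := (pvMem edu x).mp hx
        have : ∀ p ∈ pvTable, p.2 = 0 ∨ p.2 = 1 ∨ p.2 = 2 := by decide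
        rcases this p hp with h | h | h <;> omega
      simp only [List.any_cons, List.any_nil, Bool.or_false, hA]
      by_cases b0 : PySem.Chars.isIn "high".toList edu = true
      · rw [if_pos b0]
        symm
        rw [List.min?_eq_some_iff_subtype]
        exact ⟨h0.mpr b0, fun x hx => by rcases hrange x hx with h | h | h <;> omega⟩
      · rw [if_neg b0]
        by_cases b1 : (PySem.Chars.isIn "bachelor".toList edu ||
            (PySem.Chars.isIn "college".toList edu ||
             (PySem.Chars.isIn "bs".toList edu || PySem.Chars.isIn "ba".toList edu))) = true
        · rw [if_pos b1]
          symm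
          rw [List.min?_eq_some_iff_subtype]
          refine ⟨h1.mpr (by simpa [Bool.or_eq_true] using b1), fun x hx => ?_⟩
          rcases hrange x hx with h | h | h
          · exact absurd (h0.mp (h ▸ hx)) b0
          · omega
          · omega
        · rw [if_neg b1]
          by_cases b2 : (PySem.Chars.isIn "doctoral".toList edu ||
              (PySem.Chars.isIn "phd".toList edu ||
               (PySem.Chars.isIn "ma".toList edu ||
                (PySem.Chars.isIn "master".toList edu ||
                 (PySem.Chars.isIn "graduate".toList edu ||
                  (PySem.Chars.isIn "mba".toList edu || PySem.Chars.isIn "mlis".toList edu)))))) = true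
          · rw [if_pos b2]
            symm
            rw [List.min?_eq_some_iff_subtype]
            refine ⟨h2.mpr (by simpa [Bool.or_eq_true] using b2), fun x hx => ?_⟩
            rcases hrange x hx with h | h | h
            · exact absurd (h0.mp (h ▸ hx)) b0
            · exact absurd (show _ from by simpa [Bool.or_eq_true] using h1.mp (h ▸ hx)) b1
            · omega
          · rw [if_neg b2]
            symm
            rw [List.min?_eq_none_iff, List.eq_nil_iff_forall_not_mem]
            intro x hx
            rcases hrange x hx with h | h | h
            · exact b0 (h0.mp (h ▸ hx))
            · exact b1 (by simpa [Bool.or_eq_true] using h1.mp (h ▸ hx))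
            · exact b2 (by simpa [Bool.or_eq_true] using h2.mp (h ▸ hx))
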